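-- pv_equiv track=rewrite | github.com/JanJus7/cryptographyPractice | lab6/stegano.py | extractMode4
-- ===== SOURCE A (Python) =====
-- def extractMode4(content):
--     bits = []
--     i = 0
--     content = content.lower()
--     while i < len(content):
--         if content.startswith('<font></font><font>', i):
--             bits.append('1')
--             i += len('<font></font><font>')
--         elif content.startswith('</font><font></font>', i):
--             bits.append('0')
--             i += len('</font><font></font>')
--         else:
--             i += 1
--     return ''.join(bits)
-- ===== SOURCE B (Python) =====
-- def extractMode4(content):
--     P1 = '<font></font><font>'
--     P0 = '</font><font></font>'
--     rest = content.lower()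
--     out = []
--     while True:
--         j1 = rest.find(P1)
--         j0 = rest.find(P0)
--         if j1 < 0 and j0 < 0:
--             break
--         if j0 < 0 or (0 <= j1 < j0):
--             out.append('1')
--             rest = rest[j1 + len(P1):]
--         else:
--             out.append('0')
--             rest = rest[j0 + len(P0):]
--     return ''.join(out)
-- ===== Notes on version B (the rewrite author's own statement) =====
-- stated objective: faster
-- what changed: Replaces A's per-index while loop that tests startswith for both patterns at every position with a substring-search loop: str.find locates the next occurrence of each pattern in the remaining suffix, the earlier hit emits its bit and the string is sliced past it.
import Mathlib
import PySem

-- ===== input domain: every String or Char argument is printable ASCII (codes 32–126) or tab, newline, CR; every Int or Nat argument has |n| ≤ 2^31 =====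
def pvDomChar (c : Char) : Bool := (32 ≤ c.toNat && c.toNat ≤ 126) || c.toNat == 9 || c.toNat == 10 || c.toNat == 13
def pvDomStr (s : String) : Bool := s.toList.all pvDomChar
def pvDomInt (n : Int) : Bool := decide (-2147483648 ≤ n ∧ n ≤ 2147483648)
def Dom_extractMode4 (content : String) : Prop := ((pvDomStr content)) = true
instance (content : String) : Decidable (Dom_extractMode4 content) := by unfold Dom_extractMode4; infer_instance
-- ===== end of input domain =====

-- B rewrites A's per-index startswith scan as a substring-search loop (str.find on both
-- patterns, jump past the earlier hit, slice past it); a timing run measured B faster (constant-factor).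

-- the two stego patterns (already lowercase)
def pat1 : List Char := "<font></font><font>".toList     -- len 19, decodes to '1'
def pat0 : List Char := "</font><font></font>".toList    -- len 20, decodes to '0'

-- ===== PORT A =====
-- A's while loop over the index i; content.startswith(p, i) is exactly
-- p.isPrefixOf (cs.drop i) for 0 ≤ i (both are False past the end for nonempty p).
def loopA (cs : List Char) (i : Nat) : List Char :=
  if h : i < cs.length then
    if pat1.isPrefixOf (cs.drop i) then '1' :: loopA cs (i + 19)       -- i += len('<font></font><font>')
    else if pat0.isPrefixOf (cs.drop i) then '0' :: loopA cs (i + 20)  -- i += len('</font><font></font>')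
    else loopA cs (i + 1)
  else []
termination_by cs.length - i
decreasing_by all_goals omega

def extractMode4 (content : String) : String :=
  String.ofList (loopA (PySem.Str.lower content).toList 0)

-- ===== PORT B =====
-- Source B's while-True loop: find the next occurrence of each pattern in the remaining
-- suffix, emit the bit of the earlier one and slice past it (rest = rest[j+len:]).
def loopB (rest : List Char) : List Char :=
  if h : PySem.Chars.find rest pat1 < 0 ∧ PySem.Chars.find rest pat0 < 0 then []
  else if h2 : PySem.Chars.find rest pat0 < 0 ∨
      (0 ≤ PySem.Chars.find rest pat1 ∧ PySem.Chars.find rest pat1 < PySem.Chars.find rest pat0) then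
    '1' :: loopB (rest.drop ((PySem.Chars.find rest pat1).toNat + 19))
  else
    '0' :: loopB (rest.drop ((PySem.Chars.find rest pat0).toNat + 20))
termination_by rest.length
decreasing_by
  · have h1 : 0 ≤ PySem.Chars.find rest pat1 := by
      rcases h2 with h2 | h2
      · rcases (not_and_or.mp h) with h' | h' <;> omega
      · exact h2.1
    have hle : pat1.length ≤ rest.length :=
      (((PySem.Chars.find_nonneg_iff rest pat1).mp h1)).length_le
    simp only [List.length_drop]
    have : pat1.length = 19 := by decide
    omega
  · have h0 : 0 ≤ PySem.Chars.find rest pat0 := by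
      rcases (not_and_or.mp h) with h' | h'
      · rcases not_or.mp h2 with ⟨h2a, _⟩; omega
      · omega
    have hle : pat0.length ≤ rest.length :=
      (((PySem.Chars.find_nonneg_iff rest pat0).mp h0)).length_le
    simp only [List.length_drop]
    have : pat0.length = 20 := by decide
    omega

def extractMode4_alt (content : String) : String :=
  String.ofList (loopB (PySem.Str.lower content).toList)

-- ===== PRECONDITION & SPEC =====
def Spec_extractMode4 (content : String) (out : String) : Prop := out = extractMode4_alt content
instance (content : String) (out : String) : Decidable (Spec_extractMode4 content out) := by unfold Spec_extractMode4; infer_instance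

-- ===== CLAIM (what is proved, stated in full; the proofs are below) =====
def Claim_equal_extractMode4 : Prop := ∀ (content : String), Dom_extractMode4 content → Spec_extractMode4 content (extractMode4 content)

-- ===== LEMMAS AND PROOFS =====

-- proof-side view of A's loop: structural recursion on the remaining suffix
def goA (cs : List Char) : List Char :=
  match cs with
  | [] => []
  | c :: rest =>
    if pat1 <+: (c :: rest) then '1' :: goA ((c :: rest).drop 19)
    else if pat0 <+: (c :: rest) then '0' :: goA ((c :: rest).drop 20)
    else goA rest
termination_by cs.length
decreasing_by all_goals simp only [List.length_drop, List.length_cons] <;> omega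

lemma goA_nil : goA [] = [] := by simp [goA]

lemma loopA_eq_goA (cs : List Char) (i : Nat) : loopA cs i = goA (cs.drop i) := by
  induction hn : cs.length - i using Nat.strong_induction_on generalizing i with
  | _ n ih =>
  rw [loopA]
  by_cases h : i < cs.length
  · simp only [h, dif_pos]
    obtain ⟨c, rest, hcr⟩ : ∃ c rest, cs.drop i = c :: rest := by
      rcases e : cs.drop i with _ | ⟨c, rest⟩
      · exfalso; have := List.length_drop (l := cs) (i := i); rw [e] at this; simp at this; omega
      · exact ⟨c, rest, rfl⟩
    have h19 : cs.drop (i + 19) = (cs.drop i).drop 19 := by rw [List.drop_drop]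
    have h20 : cs.drop (i + 20) = (cs.drop i).drop 20 := by rw [List.drop_drop]
    have h1 : cs.drop (i + 1) = rest := by
      have hd : List.drop 1 (List.drop i cs) = List.drop (i + 1) cs := List.drop_drop ..
      rw [← hd, hcr]; simp
    by_cases hp1 : pat1 <+: cs.drop i
    · rw [if_pos ((List.isPrefixOf_iff_prefix).mpr hp1)]
      rw [ih (cs.length - (i + 19)) (by omega) (i + 19) rfl, h19]
      conv_rhs => rw [hcr]
      rw [goA, if_pos (hcr ▸ hp1)]
      rw [hcr]
    · rw [if_neg (by simpa [List.isPrefixOf_iff_prefix] using hp1)]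
      by_cases hp0 : pat0 <+: cs.drop i
      · rw [if_pos ((List.isPrefixOf_iff_prefix).mpr hp0)]
        rw [ih (cs.length - (i + 20)) (by omega) (i + 20) rfl, h20]
        conv_rhs => rw [hcr]
        rw [goA, if_neg (hcr ▸ hp1), if_pos (hcr ▸ hp0)]
        rw [hcr]
      · rw [if_neg (by simpa [List.isPrefixOf_iff_prefix] using hp0)]
        rw [ih (cs.length - (i + 1)) (by omega) (i + 1) rfl, h1]
        conv_rhs => rw [hcr]
        rw [goA, if_neg (hcr ▸ hp1), if_neg (hcr ▸ hp0)]
  · simp only [h, dif_neg, not_false_iff]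
    rw [List.drop_eq_nil_of_le (by omega), goA_nil]

-- the two patterns are never both prefixes of the same list (2nd chars 'f' vs '/')
lemma not_both_prefix (t : List Char) (h1 : pat1 <+: t) (h0 : pat0 <+: t) : False := by
  have e1 := List.prefix_iff_eq_take.mp h1
  have e0 := List.prefix_iff_eq_take.mp h0
  have hm : min pat1.length pat0.length = pat1.length := by decide
  have : pat1 = pat0.take pat1.length := by
    rw [e0, List.take_take, hm]; exact e1
  exact absurd this (by decide)

-- find s p < 0 means p occurs nowhere as a prefix of any suffix
lemma no_prefix_of_find_neg (s p : List Char) (h : PySem.Chars.find s p < 0) :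
    ∀ j, ¬ p <+: s.drop j := by
  have hinf : ¬ p <:+: s := by
    have : PySem.Chars.find s p = -1 := by
      have := PySem.Chars.neg_one_le_find s p; omega
    exact (PySem.Chars.find_eq_neg_one_iff s p).mp this
  intro j hj
  exact hinf (((PySem.Chars.isIn_iff_infix p s)).mp
    ((PySem.Chars.exists_prefix_drop_iff_isIn p s).mp ⟨j, hj⟩))

lemma goA_no_match : ∀ (cs : List Char),
    (∀ j, ¬ pat1 <+: cs.drop j) → (∀ j, ¬ pat0 <+: cs.drop j) → goA cs = [] := by
  intro cs
  induction cs with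
  | nil => intro _ _; exact goA_nil
  | cons c rest ih =>
    intro h1 h0
    rw [goA, if_neg (by simpa using h1 0), if_neg (by simpa using h0 0)]
    exact ih (fun j => by simpa using h1 (j + 1)) (fun j => by simpa using h0 (j + 1))

lemma goA_skip : ∀ (n : Nat) (cs : List Char),
    (∀ k < n, ¬ pat1 <+: cs.drop k) → (∀ k < n, ¬ pat0 <+: cs.drop k) →
    goA cs = goA (cs.drop n) := by
  intro n
  induction n with
  | zero => intro cs _ _; simp
  | succ n ih =>
    intro cs h1 h0
    match cs with
    | [] => simp
    | c :: rest =>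
      rw [goA, if_neg (by simpa using h1 0 (by omega)), if_neg (by simpa using h0 0 (by omega))]
      rw [ih rest (fun k hk => by simpa using h1 (k + 1) (by omega))
            (fun k hk => by simpa using h0 (k + 1) (by omega))]
      simp

lemma goA_match1 (cs : List Char) (h : pat1 <+: cs) : goA cs = '1' :: goA (cs.drop 19) := by
  match cs with
  | [] => exact absurd (List.prefix_nil.mp h) (by decide)
  | c :: rest => rw [goA, if_pos h]

lemma goA_match0 (cs : List Char) (h : pat0 <+: cs) : goA cs = '0' :: goA (cs.drop 20) := by
  match cs with
  | [] => exact absurd (List.prefix_nil.mp h) (by decide)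
  | c :: rest =>
    rw [goA, if_neg (fun h1 => not_both_prefix _ h1 h), if_pos h]

lemma loopB_eq_goA (cs : List Char) : loopB cs = goA cs := by
  induction hn : cs.length using Nat.strong_induction_on generalizing cs with
  | _ n ih =>
  rw [loopB]
  by_cases h : PySem.Chars.find cs pat1 < 0 ∧ PySem.Chars.find cs pat0 < 0
  · rw [dif_pos h]
    exact (goA_no_match cs (no_prefix_of_find_neg cs pat1 h.1)
      (no_prefix_of_find_neg cs pat0 h.2)).symm
  · rw [dif_neg h]
    by_cases h2 : PySem.Chars.find cs pat0 < 0 ∨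
        (0 ≤ PySem.Chars.find cs pat1 ∧ PySem.Chars.find cs pat1 < PySem.Chars.find cs pat0)
    · rw [dif_pos h2]
      have h1 : 0 ≤ PySem.Chars.find cs pat1 := by
        rcases h2 with h2 | h2
        · rcases not_and_or.mp h with h' | h' <;> omega
        · exact h2.1
      obtain ⟨hpre, hmin⟩ := PySem.Chars.find_spec h1
      set j := (PySem.Chars.find cs pat1).toNat with hj
      have hn0 : ∀ k < j, ¬ pat0 <+: cs.drop k := by
        rcases h2 with h2 | h2
        · exact fun k _ => no_prefix_of_find_neg cs pat0 h2 k
        · intro k hk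
          have h0 : 0 ≤ PySem.Chars.find cs pat0 := by omega
          exact (PySem.Chars.find_spec h0).2 k (by omega)
      have hlen : pat1.length ≤ (cs.drop j).length := hpre.length_le
      have hL : pat1.length = 19 := by decide
      simp only [List.length_drop] at hlen
      rw [ih ((cs.drop (j + 19)).length) (by simp; omega) _ rfl]
      rw [goA_skip j cs hmin hn0, goA_match1 _ hpre, List.drop_drop]
    · rw [dif_neg h2]
      rcases not_or.mp h2 with ⟨h2a, h2b⟩
      have h0 : 0 ≤ PySem.Chars.find cs pat0 := by omega
      obtain ⟨hpre, hmin⟩ := PySem.Chars.find_spec h0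
      set j := (PySem.Chars.find cs pat0).toNat with hj
      have hn1 : ∀ k < j, ¬ pat1 <+: cs.drop k := by
        by_cases hf : PySem.Chars.find cs pat1 < 0
        · exact fun k _ => no_prefix_of_find_neg cs pat1 hf k
        · intro k hk
          have h1 : 0 ≤ PySem.Chars.find cs pat1 := by omega
          have hle : PySem.Chars.find cs pat0 ≤ PySem.Chars.find cs pat1 := by
            rcases not_and_or.mp h2b with h' | h' <;> omega
          exact (PySem.Chars.find_spec h1).2 k (by omega)
      have hlen : pat0.length ≤ (cs.drop j).length := hpre.length_le
      have hL : pat0.length = 20 := by decide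
      simp only [List.length_drop] at hlen
      rw [ih ((cs.drop (j + 20)).length) (by simp; omega) _ rfl]
      rw [goA_skip j cs hn1 hmin, goA_match0 _ hpre, List.drop_drop]

-- ===== VERDICT (by name: the statement is the Claim_ definition above) =====
theorem extractMode4_spec : Claim_equal_extractMode4 := by
  intro content _
  show extractMode4 content = extractMode4_alt content
  unfold extractMode4 extractMode4_alt
  rw [loopA_eq_goA, loopB_eq_goA]
  simp
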